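-- pv_equiv track=rewrite | github.com/MaarksN/SAAS-BIRTHUB-360 | apps/ai-agents/services/bdr_agent.py | _parse
-- ===== SOURCE A (Python) =====
-- from typing import List, Dict, Any, Optional
--
-- def _parse(text: str, key: str) -> Optional[str]:
--     if not text: return None
--     if key not in text: return None
--
--     start = text.find(key) + len(key)
--     end = len(text)
--
--     # Check against known keys to find the boundary
--     keys = ["Thought:", "Action:", "Action Input:", "Final Answer:"]
--     if key in keys: keys.remove(key)
--
--     for k in keys:
--         idx = text.find(k, start)
--         if idx != -1 and idx < end:
--             end = idx
--
--     return text[start:end].strip()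
-- ===== SOURCE B (Python) =====
-- from typing import Optional
--
-- def _parse(text: str, key: str) -> Optional[str]:
--     if not text:
--         return None
--     pos = text.find(key)
--     if pos == -1:
--         return None
--     start = pos + len(key)
--     boundaries = [k for k in ["Thought:", "Action:", "Action Input:", "Final Answer:"] if k != key]
--     end = len(text)
--     for i in range(start, len(text)):
--         if any(text.startswith(b, i) for b in boundaries):
--             end = i
--             break
--     return text[start:end].strip()
-- ===== Notes on version B (the rewrite author's own statement) =====
-- stated objective: alternative
-- what changed: Replaces the three independent find(k, start) passes plus running-min with a single left-to-right pointer scan from start that stops at the first position where any remaining boundary key starts.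
import Mathlib
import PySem

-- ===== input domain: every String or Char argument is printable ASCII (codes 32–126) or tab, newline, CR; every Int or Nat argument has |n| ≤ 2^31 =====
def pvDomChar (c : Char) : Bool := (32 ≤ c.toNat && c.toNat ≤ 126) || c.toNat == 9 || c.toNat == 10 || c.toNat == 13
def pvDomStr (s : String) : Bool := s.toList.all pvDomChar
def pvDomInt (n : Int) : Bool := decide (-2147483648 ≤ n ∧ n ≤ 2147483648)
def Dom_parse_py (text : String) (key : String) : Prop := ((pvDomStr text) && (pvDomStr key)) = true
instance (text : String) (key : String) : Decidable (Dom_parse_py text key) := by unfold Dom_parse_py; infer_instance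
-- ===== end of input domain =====

-- B replaces A's per-key find passes with one left-to-right scan; same return value (alternative algorithm, no speed claim).

-- ===== PORT A =====
def parse_py (text : String) (key : String) : Option String :=
  if PySem.Str.len text == 0 then none
  else if !(PySem.Str.isIn key text) then none
  else
    let start : Int := PySem.Str.find text key + (PySem.Str.len key : Int)
    let keys0 : List String := ["Thought:", "Action:", "Action Input:", "Final Answer:"]
    let keys : List String :=
      if keys0.contains key then (PySem.List.remove? keys0 key).getD keys0 else keys0
    let endv : Int := keys.foldl (fun e k =>
      let idx := PySem.Str.findFrom text k start
      if idx ≠ -1 ∧ idx < e then idx else e) (PySem.Str.len text)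
    some (PySem.Str.strip (PySem.Str.slice text (some start) (some endv)))

-- ===== PORT B =====
-- scan positions i = start, start+1, … until some boundary key starts at i
-- (text.startswith(b, i) with 0 ≤ i is exactly 'b is a prefix of the drop-i suffix')
def pvScan (t : List Char) (bs : List String) (i : Nat) : Nat :=
  if i < t.length then
    if bs.any (fun b => PySem.Chars.startswith (t.drop i) b.toList) then i
    else pvScan t bs (i+1)
  else t.length
termination_by t.length - i

def parse_py_alt (text : String) (key : String) : Option String :=
  if PySem.Str.len text == 0 then none
  else
    let pos := PySem.Str.find text key
    if pos == -1 then none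
    else
      let start : Nat := pos.toNat + key.toList.length
      let bs : List String :=
        (["Thought:", "Action:", "Action Input:", "Final Answer:"]).filter (fun k => k ≠ key)
      let e : Nat := pvScan text.toList bs start
      some (PySem.Str.strip (PySem.Str.slice text (some (start : Int)) (some (e : Int))))

-- ===== PRECONDITION & SPEC =====
def Spec_parse_py (text : String) (key : String) (out : Option String) : Prop := out = parse_py_alt text key
instance (text : String) (key : String) (out : Option String) : Decidable (Spec_parse_py text key out) := by unfold Spec_parse_py; infer_instance

-- ===== CLAIM (what is proved, stated in full; the proofs are below) =====
def Claim_equal_parse_py : Prop := ∀ (text : String) (key : String), Dom_parse_py text key → Spec_parse_py text key (parse_py text key)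

-- ===== LEMMAS AND PROOFS =====

def pvFoldA (t : List Char) (s : Nat) (bs : List String) (e : Int) : Int :=
  bs.foldl (fun e k =>
    if PySem.Chars.findFrom t k.toList ((s : Nat) : Int) ≠ -1 ∧
       PySem.Chars.findFrom t k.toList ((s : Nat) : Int) < e
    then PySem.Chars.findFrom t k.toList ((s : Nat) : Int) else e) e

lemma pvScan_spec (t : List Char) (bs : List String) :
    ∀ d i, t.length - i ≤ d → i ≤ t.length →
      i ≤ pvScan t bs i ∧ pvScan t bs i ≤ t.length ∧
      (pvScan t bs i < t.length →
        bs.any (fun b => PySem.Chars.startswith (t.drop (pvScan t bs i)) b.toList) = true) ∧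
      (∀ j, i ≤ j → j < pvScan t bs i →
        bs.any (fun b => PySem.Chars.startswith (t.drop j) b.toList) = false) := by
  intro d
  induction d with
  | zero =>
    intro i hd hi
    have hie : ¬ (i < t.length) := by omega
    rw [pvScan, if_neg hie]
    exact ⟨hi, le_refl _, by intro h; omega, by intro j hj1 hj2; omega⟩
  | succ d ih =>
    intro i hd hi
    rw [pvScan]
    by_cases h1 : i < t.length
    · rw [if_pos h1]
      by_cases h2 : bs.any (fun b => PySem.Chars.startswith (t.drop i) b.toList) = true
      · rw [if_pos h2]
        exact ⟨le_refl i, le_of_lt h1, fun _ => h2, by intro j hj1 hj2; omega⟩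
      · rw [if_neg h2]
        obtain ⟨a1, a2, a3, a4⟩ := ih (i + 1) (by omega) (by omega)
        refine ⟨by omega, a2, a3, ?_⟩
        intro j hj1 hj2
        rcases Nat.eq_or_lt_of_le hj1 with h | h
        · subst h; simpa using h2
        · exact a4 j h hj2
    · rw [if_neg h1]
      exact ⟨hi, le_refl _, by intro h; omega, by intro j hj1 hj2; omega⟩

lemma pvFoldA_bounds (t : List Char) (s : Nat) :
    ∀ (bs : List String) (e : Int),
      pvFoldA t s bs e ≤ e ∧
      (∀ L : Int, L ≤ e →
        (∀ k ∈ bs, PySem.Chars.findFrom t k.toList ((s : Nat) : Int) ≠ -1 →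
          L ≤ PySem.Chars.findFrom t k.toList ((s : Nat) : Int)) →
        L ≤ pvFoldA t s bs e) ∧
      (∀ k ∈ bs, PySem.Chars.findFrom t k.toList ((s : Nat) : Int) ≠ -1 →
        pvFoldA t s bs e ≤ PySem.Chars.findFrom t k.toList ((s : Nat) : Int)) := by
  intro bs
  induction bs with
  | nil => intro e; refine ⟨le_refl _, fun L hL _ => hL, by simp⟩
  | cons k bs ih =>
    intro e
    have hstep : pvFoldA t s (k :: bs) e = pvFoldA t s bs
        (if PySem.Chars.findFrom t k.toList ((s : Nat) : Int) ≠ -1 ∧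
            PySem.Chars.findFrom t k.toList ((s : Nat) : Int) < e
         then PySem.Chars.findFrom t k.toList ((s : Nat) : Int) else e) := rfl
    set p := PySem.Chars.findFrom t k.toList ((s : Nat) : Int) with hp
    set e' := (if p ≠ -1 ∧ p < e then p else e) with he'
    obtain ⟨b1, b2, b3⟩ := ih e'
    have he'le : e' ≤ e := by
      rw [he']; split_ifs with h
      · exact le_of_lt h.2
      · exact le_refl e
    have he'p : p ≠ -1 → e' ≤ p := by
      intro hne; rw [he']; split_ifs with h
      · exact le_refl p
      · rw [not_and] at h; have := h hne; omega
    refine ⟨hstep ▸ le_trans b1 he'le, ?_, ?_⟩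
    · intro L hL hall
      rw [hstep]
      apply b2
      · rw [he']; split_ifs with h
        · exact hall k List.mem_cons_self h.1
        · exact hL
      · intro k' hk' h'; exact hall k' (List.mem_cons_of_mem _ hk') h'
    · intro k' hk' h'
      rcases List.mem_cons.mp hk' with rfl | hk'
      · exact hstep ▸ le_trans b1 (he'p h')
      · exact hstep ▸ b3 k' hk' h'

lemma fold_eq_scan (t : List Char) (bs : List String) (s : Nat) (hs : s ≤ t.length) :
    bs.foldl (fun e k =>
      if PySem.Chars.findFrom t k.toList ((s : Nat) : Int) ≠ -1 ∧
         PySem.Chars.findFrom t k.toList ((s : Nat) : Int) < e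
      then PySem.Chars.findFrom t k.toList ((s : Nat) : Int) else e) ((t.length : Nat) : Int)
    = ((pvScan t bs s : Nat) : Int) := by
  show pvFoldA t s bs ((t.length : Nat) : Int) = ((pvScan t bs s : Nat) : Int)
  obtain ⟨r1, r2, r3, r4⟩ := pvScan_spec t bs (t.length - s) s (le_refl _) hs
  set r := pvScan t bs s with hr
  obtain ⟨f1, f2, f3⟩ := pvFoldA_bounds t s bs ((t.length : Nat) : Int)
  have lower : (r : Int) ≤ pvFoldA t s bs ((t.length : Nat) : Int) := by
    apply f2
    · exact_mod_cast r2
    · intro k hk hne'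
      obtain ⟨g1, g2, g3⟩ := PySem.Chars.findFrom_natCast_spec t k.toList s hs hne'
      set p := PySem.Chars.findFrom t k.toList ((s : Nat) : Int) with hp
      have hp0 : (0 : Int) ≤ p := le_trans (by exact_mod_cast Nat.zero_le s) g1
      have hsp : s ≤ p.toNat := by omega
      by_contra hlt
      rw [not_le] at hlt
      have hpr : p.toNat < r := by omega
      have hfalse := r4 p.toNat hsp hpr
      have htrue : bs.any (fun b => PySem.Chars.startswith (t.drop p.toNat) b.toList) = true :=
        List.any_eq_true.mpr ⟨k, hk, (PySem.Chars.startswith_iff _ _).mpr g2⟩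
      rw [hfalse] at htrue
      exact Bool.false_ne_true htrue
  have upper : pvFoldA t s bs ((t.length : Nat) : Int) ≤ (r : Int) := by
    by_cases hrl : r < t.length
    · obtain ⟨k, hk, hst⟩ := List.any_eq_true.mp (r3 hrl)
      have hpre : k.toList <+: t.drop r := (PySem.Chars.startswith_iff _ _).mp hst
      have hinf : k.toList <:+: t.drop s := by
        have hdd : t.drop r = (t.drop s).drop (r - s) := by
          rw [List.drop_drop]; congr 1; omega
        exact List.IsInfix.trans (hdd ▸ hpre).isInfix (List.drop_suffix _ _).isInfix
      have hne' : PySem.Chars.findFrom t k.toList ((s : Nat) : Int) ≠ -1 := by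
        intro hcon
        exact ((PySem.Chars.findFrom_natCast_eq_neg_one_iff t k.toList s hs).mp hcon) hinf
      obtain ⟨g1, g2, g3⟩ := PySem.Chars.findFrom_natCast_spec t k.toList s hs hne'
      set p := PySem.Chars.findFrom t k.toList ((s : Nat) : Int) with hp
      have hp0 : (0 : Int) ≤ p := le_trans (by exact_mod_cast Nat.zero_le s) g1
      have hple : p.toNat ≤ r := by
        by_contra h
        rw [not_le] at h
        exact g3 r r1 h hpre
      calc pvFoldA t s bs ((t.length : Nat) : Int) ≤ p := f3 k hk hne'
        _ = ((p.toNat : Nat) : Int) := (Int.toNat_of_nonneg hp0).symm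
        _ ≤ (r : Int) := by exact_mod_cast hple
    · have hre : r = t.length := by omega
      rw [hre]; exact f1
  exact le_antisymm upper lower

lemma keys_eq (key : String) :
    (if (["Thought:", "Action:", "Action Input:", "Final Answer:"] : List String).contains key
     then (PySem.List.remove? ["Thought:", "Action:", "Action Input:", "Final Answer:"] key).getD
            ["Thought:", "Action:", "Action Input:", "Final Answer:"]
     else ["Thought:", "Action:", "Action Input:", "Final Answer:"])
    = (["Thought:", "Action:", "Action Input:", "Final Answer:"] : List String).filter
        (fun k => k ≠ key) := by
  by_cases h1 : key = "Thought:"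
  · subst h1; decide
  by_cases h2 : key = "Action:"
  · subst h2; decide
  by_cases h3 : key = "Action Input:"
  · subst h3; decide
  by_cases h4 : key = "Final Answer:"
  · subst h4; decide
  have d1 : ("Thought:" : String) ≠ key := fun h => h1 h.symm
  have d2 : ("Action:" : String) ≠ key := fun h => h2 h.symm
  have d3 : ("Action Input:" : String) ≠ key := fun h => h3 h.symm
  have d4 : ("Final Answer:" : String) ≠ key := fun h => h4 h.symm
  simp [h1, h2, h3, h4]
  rw [eq_comm, List.filter_eq_self]
  intro a ha
  fin_cases ha <;> simp [d1, d2, d3, d4]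

-- ===== VERDICT (by name: the statement is the Claim_ definition above) =====
theorem parse_py_spec : Claim_equal_parse_py := by
  intro text key _
  unfold Spec_parse_py
  simp only [parse_py, parse_py_alt]
  by_cases hT : text.toList.length = 0
  · have hA1 : (PySem.Str.len text == 0) = true := by
      rw [PySem.Str.len_eq, hT]; rfl
    rw [hA1]
    rfl
  · have hA1 : (PySem.Str.len text == 0) = false := by
      rw [PySem.Str.len_eq]
      simp only [beq_eq_false_iff_ne, ne_eq, Nat.cast_eq_zero]
      exact hT
    rw [hA1]
    by_cases hIn : key.toList <:+: text.toList
    · have hfind0 : (0 : Int) ≤ PySem.Chars.find text.toList key.toList :=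
        (PySem.Chars.find_nonneg_iff _ _).mpr hIn
      have hInB : PySem.Str.isIn key text = true := by
        rw [PySem.Str.isIn_eq]; exact (PySem.Chars.isIn_iff_infix _ _).mpr hIn
      have hB2 : (PySem.Str.find text key == -1) = false := by
        rw [PySem.Str.find_eq]
        simp only [beq_eq_false_iff_ne, ne_eq]
        intro h
        exact ((PySem.Chars.find_eq_neg_one_iff _ _).mp h) hIn
      rw [hInB, hB2]
      set f : Nat := (PySem.Chars.find text.toList key.toList).toNat with hf
      have hfc : PySem.Chars.find text.toList key.toList = ((f : Nat) : Int) :=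
        (Int.toNat_of_nonneg hfind0).symm
      set s : Nat := f + key.toList.length with hsdef
      have hstart : PySem.Str.find text key + PySem.Str.len key = ((s : Nat) : Int) := by
        rw [PySem.Str.find_eq, PySem.Str.len_eq, hfc, hsdef]; push_cast; ring
      have hs_le : s ≤ text.toList.length := by
        have hp := (PySem.Chars.find_spec hfind0).1.length_le
        rw [List.length_drop, ← hf] at hp
        have hfl := PySem.Chars.find_le_length text.toList key.toList
        rw [hfc] at hfl
        rw [hsdef]
        omega
      have hstartB : (PySem.Str.find text key).toNat + key.toList.length = s := by
        rw [PySem.Str.find_eq, ← hf, hsdef]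
      rw [keys_eq, hstartB]
      simp only [PySem.Str.findFrom_eq]
      rw [hstart]
      simp only [PySem.Str.len_eq]
      rw [fold_eq_scan text.toList _ s hs_le]
      simp only [Bool.not_true, Bool.false_eq_true, if_false]
    · have hInB : PySem.Str.isIn key text = false := by
        rw [PySem.Str.isIn_eq]
        exact (PySem.Chars.isIn_eq_false_iff _ _).mpr hIn
      have hfe : (PySem.Str.find text key == -1) = true := by
        rw [PySem.Str.find_eq, beq_iff_eq]
        exact (PySem.Chars.find_eq_neg_one_iff _ _).mpr hIn
      rw [hInB, hfe]
      simp only [Bool.false_eq_true, if_false, Bool.not_false, if_true]
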